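-- pv_equiv track=rewrite | github.com/J4E-mik/CapstoneDesign | database/routing.py | reconstruct_next_node
-- ===== SOURCE A (Python) =====
-- def reconstruct_next_node(prev, start, goal):
--     if goal not in prev:
--         return None
--     node = goal
--     while prev.get(node) != start:
--         node = prev.get(node)
--         if node is None:
--             return None
--     return node
-- ===== SOURCE B (Python) =====
-- def reconstruct_next_node(prev, start, goal):
--     # Instead of chasing parent pointers from goal, invert the graph and run a
--     # multi-source BFS forward from start's children: label[n] = the ancestor of
--     # n (inclusive) whose predecessor is start, propagated child-ward.
--     children = {}
--     for n, p in prev.items():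
--         children.setdefault(p, []).append(n)
--     label = {}
--     queue = []
--     for n, p in prev.items():
--         if p == start:
--             label[n] = n
--             queue.append(n)
--     i = 0
--     while i < len(queue):
--         n = queue[i]
--         i += 1
--         m = label[n]
--         for c in children.get(n, []):
--             if c not in label:
--                 label[c] = m
--                 queue.append(c)
--     return label.get(goal)
-- ===== Notes on version B (the rewrite author's own statement) =====
-- stated objective: alternative
-- what changed: Replaces A's parent-pointer walk from goal with an inverted-graph search: build a children adjacency map and a seed labelling of start's children, run a multi-source BFS propagating each label child-ward, then read off label.get(goal). Pre_ excludes only inputs where A's while-loop never returns (a prev-cycle reachable from goal missing start).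
import Mathlib
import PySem

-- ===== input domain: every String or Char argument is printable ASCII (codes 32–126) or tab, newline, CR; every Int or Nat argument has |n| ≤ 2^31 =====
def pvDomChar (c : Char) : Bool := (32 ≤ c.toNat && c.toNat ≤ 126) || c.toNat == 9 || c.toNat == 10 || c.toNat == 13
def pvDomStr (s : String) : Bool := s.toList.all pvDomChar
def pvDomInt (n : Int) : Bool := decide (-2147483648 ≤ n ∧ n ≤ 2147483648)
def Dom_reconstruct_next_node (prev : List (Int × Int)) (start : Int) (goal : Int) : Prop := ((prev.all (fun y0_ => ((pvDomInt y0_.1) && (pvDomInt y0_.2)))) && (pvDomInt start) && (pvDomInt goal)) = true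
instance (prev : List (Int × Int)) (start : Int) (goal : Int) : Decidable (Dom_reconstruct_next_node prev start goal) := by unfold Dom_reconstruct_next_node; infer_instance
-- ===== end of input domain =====

-- B inverts the graph and runs a multi-source BFS from start's children instead of chasing
-- parent pointers from goal; equivalence is about the return value on every input where A's
-- loop returns (Pre_).

-- ===== PORT A =====
-- A's while-loop as fuel recursion; under Pre_ the fuel d.size + 1 is never exhausted.
def chaseA (d : PySem.Dict Int Int) (start : Int) : Nat → Int → Option Int
  | 0, _ => none
  | fuel + 1, node =>
    if d.get? node = some start then some node          -- while prev.get(node) != start exits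
    else
      match d.get? node with
      | none => none                                    -- node = prev.get(node); if node is None: return None
      | some m => chaseA d start fuel m

def reconstruct_next_node (prev : List (Int × Int)) (start : Int) (goal : Int) : Option Int :=
  let d := PySem.Dict.ofList prev
  if (d.get? goal).isSome then                          -- if goal not in prev: return None
    chaseA d start (d.size + 1) goal
  else none

-- ===== PORT B =====
-- children = {}; for n, p in prev.items(): children.setdefault(p, []).append(n)
def childrenB (items : List (Int × Int)) : PySem.Dict Int (List Int) :=
  items.foldl (fun ch np => ch.modify np.2 [] (· ++ [np.1])) PySem.Dict.empty

-- label = {}; queue = []; for n, p in prev.items(): if p == start: label[n] = n; queue.append(n)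
def seedsB (items : List (Int × Int)) (start : Int) : PySem.Dict Int Int × List Int :=
  items.foldl
    (fun acc np => if np.2 = start then (acc.1.insert np.1 np.1, acc.2 ++ [np.1]) else acc)
    (PySem.Dict.empty, [])

-- inner loop body: for c in children.get(n, []): if c not in label: label[c] = m; queue.append(c)
def bfsChild (m : Int) (acc : PySem.Dict Int Int × List Int) (c : Int) :
    PySem.Dict Int Int × List Int :=
  if (acc.1.get? c).isNone then (acc.1.insert c m, acc.2 ++ [c]) else acc

-- while i < len(queue): … ; pending queue is the suffix not yet visited, enqueues append to it;
-- the fuel d.size + |initial queue| always outlasts the queue (each enqueue labels a fresh key).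
def bfsLoop (ch : PySem.Dict Int (List Int)) :
    Nat → List Int → PySem.Dict Int Int → PySem.Dict Int Int
  | 0, _, label => label
  | _ + 1, [], label => label
  | f + 1, n :: rest, label =>
    match label.get? n with
    | none => label          -- totality guard only: every queued node is labelled (m = label[n])
    | some m =>
      let st := (ch.getD n []).foldl (bfsChild m) (label, [])
      bfsLoop ch f (rest ++ st.2) st.1

def reconstruct_next_node_alt (prev : List (Int × Int)) (start : Int) (goal : Int) : Option Int :=
  let d := PySem.Dict.ofList prev
  let ch := childrenB d.items
  let sq := seedsB d.items start
  (bfsLoop ch (d.size + sq.2.length) sq.2 sq.1).get? goal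

-- ===== PRECONDITION & SPEC =====
-- the k-th node of the backward chain from n (k-fold iteration of the prev edge map), and the
-- condition under which A's walk stops at a node (predecessor is start, or absent)
def seqP (d : PySem.Dict Int Int) (k : Nat) (n : Int) : Option Int :=
  (fun o => o.bind d.get?)^[k] (some n)

def stopB (d : PySem.Dict Int Int) (start : Int) (o : Option Int) : Bool :=
  match o with
  | none => true
  | some m => (d.get? m == some start) || (d.get? m == none)

-- Pre_ excludes exactly the inputs on which A's while-loop never returns (a prev-cycle reachable
-- from goal that misses start): the backward chain from goal must reach a node whose predecessor
-- is start or is absent within size steps (by pigeonhole this is exactly termination of A).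
def Pre_reconstruct_next_node (prev : List (Int × Int)) (start : Int) (goal : Int) : Prop :=
  ∃ k < (PySem.Dict.ofList prev).size + 1,
    stopB (PySem.Dict.ofList prev) start (seqP (PySem.Dict.ofList prev) k goal) = true

instance (prev : List (Int × Int)) (start : Int) (goal : Int) : Decidable (Pre_reconstruct_next_node prev start goal) := by
  unfold Pre_reconstruct_next_node; infer_instance

def pvWitness_reconstruct_next_node : (List (Int × Int)) × Int × Int := ([(3, 2), (2, 1)], 1, 3)

def Spec_reconstruct_next_node (prev : List (Int × Int)) (start : Int) (goal : Int) (out : Option Int) : Prop := out = reconstruct_next_node_alt prev start goal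
instance (prev : List (Int × Int)) (start : Int) (goal : Int) (out : Option Int) : Decidable (Spec_reconstruct_next_node prev start goal out) := by unfold Spec_reconstruct_next_node; infer_instance

-- ===== CLAIM (what is proved, stated in full; the proofs are below) =====
def Claim_equal_reconstruct_next_node : Prop := ∀ (prev : List (Int × Int)) (start : Int) (goal : Int), Dom_reconstruct_next_node prev start goal → Pre_reconstruct_next_node prev start goal → Spec_reconstruct_next_node prev start goal (reconstruct_next_node prev start goal)

-- ===== LEMMAS AND PROOFS =====

-- m is the answer of A's walk from n (for some fuel)
def GoodP (d : PySem.Dict Int Int) (start : Int) (n m : Int) : Prop :=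
  ∃ fuel, chaseA d start fuel n = some m

-- once the walk returns a node, more fuel returns the same node
theorem chase_succ (d : PySem.Dict Int Int) (start : Int) :
    ∀ (fuel : Nat) (n m : Int), chaseA d start fuel n = some m →
      chaseA d start (fuel + 1) n = some m := by
  intro fuel
  induction fuel with
  | zero => intro n m h; simp [chaseA] at h
  | succ f ih =>
    intro n m h
    by_cases hs : d.get? n = some start
    · simp [chaseA, hs] at h ⊢; simpa [chaseA, hs] using h
    · cases hg : d.get? n with
      | none => simp [chaseA, hg] at h
      | some p =>
        have hps : ¬ p = start := fun e => hs (by rw [hg, e])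
        have h' : chaseA d start f p = some m := by simpa [chaseA, hg, hps] using h
        have := ih p m h'
        simpa [chaseA, hg, hps] using this

theorem chase_mono (d : PySem.Dict Int Int) (start : Int) (fuel j : Nat) (n m : Int)
    (h : chaseA d start fuel n = some m) : chaseA d start (fuel + j) n = some m := by
  induction j with
  | zero => simpa using h
  | succ k ih => simpa [← Nat.add_assoc] using chase_succ d start (fuel + k) n m ih

theorem good_unique (d : PySem.Dict Int Int) (start : Int) (n m m' : Int)
    (h : GoodP d start n m) (h' : GoodP d start n m') : m = m' := by
  obtain ⟨f, hf⟩ := h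
  obtain ⟨f', hf'⟩ := h'
  have h1 := chase_mono d start f f' n m hf
  have h2 := chase_mono d start f' f n m' hf'
  rw [Nat.add_comm] at h2
  rw [h1] at h2
  exact Option.some.inj h2

-- if the chain from n stops at step k, the walk's value is determined for every fuel ≥ k+1
theorem chase_stable (d : PySem.Dict Int Int) (start : Int) :
    ∀ (k : Nat) (n : Int), stopB d start (seqP d k n) = true →
      ∀ j, chaseA d start (k + 1 + j) n = chaseA d start (k + 1) n := by
  intro k
  induction k with
  | zero =>
    intro n h j
    simp only [seqP, Function.iterate_zero, id_eq, stopB] at h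
    rcases Bool.or_eq_true_iff.mp h with h1 | h2
    · have hst : d.get? n = some start := by simpa using (beq_iff_eq.mp h1)
      rw [Nat.add_comm 1 j]
      simp [chaseA, hst]
    · have hn : d.get? n = none := by simpa using (beq_iff_eq.mp h2)
      rw [Nat.add_comm 1 j]
      cases j with
      | zero => rfl
      | succ j' =>
        have hns : ¬ d.get? n = some start := by rw [hn]; simp
        simp [chaseA, hn]
  | succ k ih =>
    intro n h j
    by_cases hs : d.get? n = some start
    · have e1 : k + 1 + 1 + j = (k + 1 + j) + 1 := by omega
      rw [e1]
      simp [chaseA, hs]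
    · cases hg : d.get? n with
      | none =>
        have e1 : k + 1 + 1 + j = (k + 1 + j) + 1 := by omega
        rw [e1]
        simp [chaseA, hg]
      | some p =>
        have hps : ¬ p = start := fun e => hs (by rw [hg, e])
        have h' : stopB d start (seqP d k p) = true := by
          have : seqP d (k + 1) n = seqP d k p := by
            simp [seqP, Function.iterate_succ_apply, hg]
          rwa [this] at h
        have e1 : chaseA d start (k + 1 + 1 + j) n = chaseA d start (k + 1 + j) p := by
          have : k + 1 + 1 + j = (k + 1 + j) + 1 := by omega
          rw [this]; simp [chaseA, hg, hps]
        have e2 : chaseA d start (k + 1 + 1) n = chaseA d start (k + 1) p := by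
          simp [chaseA, hg, hps]
        rw [e1, e2, ih p h' j]

-- ----- the seed loop: closed forms for its two components -----

theorem seeds_fst (start : Int) :
    ∀ (sub : List (Int × Int)) (l : PySem.Dict Int Int) (q : List Int),
      (sub.foldl
        (fun acc np => if np.2 = start then (acc.1.insert np.1 np.1, acc.2 ++ [np.1]) else acc)
        (l, q)).1 =
      sub.foldl (fun l np => if np.2 = start then l.insert np.1 np.1 else l) l := by
  intro sub
  induction sub with
  | nil => intro l q; rfl
  | cons hd tl ih =>
    intro l q
    by_cases h : hd.2 = start
    · simp only [List.foldl_cons, h, if_pos]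
      exact ih _ _
    · simp only [List.foldl_cons, h, if_false]
      exact ih _ _

theorem seeds_snd (start : Int) :
    ∀ (sub : List (Int × Int)) (l : PySem.Dict Int Int) (q : List Int),
      (sub.foldl
        (fun acc np => if np.2 = start then (acc.1.insert np.1 np.1, acc.2 ++ [np.1]) else acc)
        (l, q)).2 =
      q ++ (sub.filter (fun np => np.2 == start)).map Prod.fst := by
  intro sub
  induction sub with
  | nil => intro l q; simp
  | cons hd tl ih =>
    intro l q
    by_cases h : hd.2 = start
    · simp only [List.foldl_cons, h, if_pos, List.filter_cons, beq_iff_eq,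
        List.map_cons]
      rw [ih]
      simp
    · have h' : (hd.2 == start) = false := by simpa using h
      simp only [List.foldl_cons, h, if_false, List.filter_cons, h']
      exact ih _ _

-- the seed label, pointwise: n is labelled n exactly when (n, start) is an item
theorem init_get (start : Int) :
    ∀ (sub : List (Int × Int)) (l : PySem.Dict Int Int) (x : Int),
      (sub.map Prod.fst).Nodup →
      (sub.foldl (fun l np => if np.2 = start then l.insert np.1 np.1 else l) l).get? x =
        if (x, start) ∈ sub then some x else l.get? x := by
  intro sub
  induction sub with
  | nil => intro l x _; simp
  | cons hd tl ih =>
    intro l x hnd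
    obtain ⟨n, p⟩ := hd
    simp only [List.map_cons, List.nodup_cons] at hnd
    obtain ⟨hnmem, hnd'⟩ := hnd
    by_cases hx : (x, start) ∈ (n, p) :: tl
    · simp only [hx, if_true]
      rcases List.mem_cons.mp hx with heq | htl
      · obtain ⟨rfl, rfl⟩ := Prod.mk.inj heq
        have hxtl : (x, start) ∉ tl := fun h => hnmem (List.mem_map.mpr ⟨(x, start), h, rfl⟩)
        rw [List.foldl_cons]
        simp only
        rw [ih _ x hnd', if_neg hxtl]
        exact PySem.Dict.get?_insert_self _ _ _
      · rw [List.foldl_cons, ih _ x hnd', if_pos htl]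
    · simp only [hx, if_false]
      have hxtl : (x, start) ∉ tl := fun h => hx (List.mem_cons_of_mem _ h)
      rw [List.foldl_cons, ih _ x hnd', if_neg hxtl]
      by_cases hp : p = start
      · subst hp
        have hxn : x ≠ n := by intro e; subst e; exact hx (List.mem_cons_self)
        simp only
        exact PySem.Dict.get?_insert_of_ne _ _ hxn
      · simp [hp]

-- ----- the children dictionary: membership -----

theorem mem_children (items : List (Int × Int)) (n x : Int) :
    x ∈ (childrenB items).getD n [] ↔ (x, n) ∈ items := by
  unfold childrenB
  have h : items.foldl (fun ch np => ch.modify np.2 [] (· ++ [np.1])) PySem.Dict.empty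
      = (items.map Prod.swap).foldl (fun ch q => ch.modify q.1 [] (· ++ [q.2]))
          PySem.Dict.empty := by
    rw [List.foldl_map]; rfl
  rw [h, PySem.Dict.getD_foldl_modify_append]
  simp only [PySem.Dict.getD_empty, List.nil_append, List.mem_map, List.mem_filter,
    beq_iff_eq]
  constructor
  · rintro ⟨q, ⟨⟨np, hnp, rfl⟩, hq1⟩, rfl⟩
    obtain ⟨a, b⟩ := np
    simp only [Prod.swap] at hq1 ⊢
    subst hq1
    simpa using hnp
  · intro hmem
    exact ⟨(n, x), ⟨⟨(x, n), hmem, rfl⟩, rfl⟩, rfl⟩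

-- ----- the inner child loop, fully characterised -----

theorem inner_spec (m : Int) :
    ∀ (cs : List Int) (lab : PySem.Dict Int Int) (out : List Int),
      ∃ fresh : List Int,
        (cs.foldl (bfsChild m) (lab, out)).2 = out ++ fresh ∧
        (∀ x ∈ fresh, x ∈ cs ∧ lab.get? x = none) ∧
        (∀ x, (cs.foldl (bfsChild m) (lab, out)).1.get? x =
          if x ∈ fresh then some m else lab.get? x) ∧
        (cs.foldl (bfsChild m) (lab, out)).1.size = lab.size + fresh.length ∧
        (∀ x ∈ cs, ((cs.foldl (bfsChild m) (lab, out)).1.get? x).isSome) ∧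
        (lab.keys.Nodup → (cs.foldl (bfsChild m) (lab, out)).1.keys.Nodup) ∧
        (∀ x, (cs.foldl (bfsChild m) (lab, out)).1.contains x →
          lab.contains x = true ∨ x ∈ cs) := by
  intro cs
  induction cs with
  | nil =>
    intro lab out
    exact ⟨[], by simp, by simp, by simp, by simp, by simp, fun h => h, fun x h => Or.inl h⟩
  | cons c tl ih =>
    intro lab out
    by_cases hc : (lab.get? c).isNone
    · have hstep : bfsChild m (lab, out) c = (lab.insert c m, out ++ [c]) := by
        simp [bfsChild, hc]
      obtain ⟨fresh, h2, hmem, hget, hsize, hsome, hnd, hcont⟩ := ih (lab.insert c m) (out ++ [c])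
      have hcnone : lab.get? c = none := Option.isNone_iff_eq_none.mp hc
      have hcfresh : c ∉ fresh := by
        intro hcf
        have := (hmem c hcf).2
        rw [PySem.Dict.get?_insert_self] at this
        simp at this
      refine ⟨c :: fresh, ?_, ?_, ?_, ?_, ?_, ?_, ?_⟩
      · rw [List.foldl_cons, hstep, h2]; simp
      · intro x hx
        rcases List.mem_cons.mp hx with rfl | hx'
        · exact ⟨List.mem_cons_self, hcnone⟩
        · obtain ⟨hxtl, hxn⟩ := hmem x hx'
          refine ⟨List.mem_cons_of_mem _ hxtl, ?_⟩
          by_cases hxc : x = c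
          · subst hxc; exact hcnone
          · rwa [PySem.Dict.get?_insert_of_ne _ _ hxc] at hxn
      · intro x
        rw [List.foldl_cons, hstep, hget x]
        by_cases hxc : x = c
        · subst hxc
          simp [hcfresh, PySem.Dict.get?_insert_self]
        · by_cases hxf : x ∈ fresh
          · simp [hxf, List.mem_cons, hxc]
          · simp [List.mem_cons, hxc, hxf, PySem.Dict.get?_insert_of_ne _ _ hxc]
      · rw [List.foldl_cons, hstep, hsize, PySem.Dict.size_insert]
        have : lab.contains c = false := by
          rw [← PySem.Dict.get?_eq_none_iff_contains]; exact hcnone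
        simp only [this, Bool.false_eq_true, if_false, List.length_cons]
        omega
      · intro x hx
        rw [List.foldl_cons, hstep]
        rcases List.mem_cons.mp hx with rfl | hx'
        · rw [hget x]
          by_cases hxf : x ∈ fresh
          · simp [hxf]
          · simp only [hxf, if_false]
            rw [PySem.Dict.get?_insert_self]; simp
        · exact hsome x hx'
      · intro hlab
        rw [List.foldl_cons, hstep]
        exact hnd (PySem.Dict.nodup_keys_insert _ _ _ hlab)
      · intro x hx
        rw [List.foldl_cons, hstep] at hx
        rcases hcont x hx with hx' | hx'
        · rw [PySem.Dict.contains_insert] at hx'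
          rcases Bool.or_eq_true_iff.mp hx' with he | ho
          · exact Or.inr (by simp [beq_iff_eq.mp he])
          · exact Or.inl ho
        · exact Or.inr (List.mem_cons_of_mem _ hx')
    · have hstep : bfsChild m (lab, out) c = (lab, out) := by
        simp [bfsChild, hc]
      obtain ⟨fresh, h2, hmem, hget, hsize, hsome, hnd, hcont⟩ := ih lab out
      refine ⟨fresh, ?_, ?_, ?_, ?_, ?_, ?_, ?_⟩
      · rw [List.foldl_cons, hstep]; exact h2
      · intro x hx
        obtain ⟨hxtl, hxn⟩ := hmem x hx
        exact ⟨List.mem_cons_of_mem _ hxtl, hxn⟩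
      · intro x; rw [List.foldl_cons, hstep]; exact hget x
      · rw [List.foldl_cons, hstep]; exact hsize
      · intro x hx
        rw [List.foldl_cons, hstep]
        rcases List.mem_cons.mp hx with rfl | hx'
        · rw [hget x]
          by_cases hxf : x ∈ fresh
          · simp [hxf]
          · simp only [hxf, if_false]
            exact Option.ne_none_iff_isSome.mp (by simpa using hc)
        · exact hsome x hx'
      · intro hlab; rw [List.foldl_cons, hstep]; exact hnd hlab
      · intro x hx
        rw [List.foldl_cons, hstep] at hx
        rcases hcont x hx with hx' | hx'
        · exact Or.inl hx'
        · exact Or.inr (List.mem_cons_of_mem _ hx')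

-- bindings persist through the BFS loop
theorem bfs_get_some (ch : PySem.Dict Int (List Int)) :
    ∀ (f : Nat) (q : List Int) (l : PySem.Dict Int Int) (x v : Int),
      l.get? x = some v → (bfsLoop ch f q l).get? x = some v := by
  intro f
  induction f with
  | zero => intro q l x v h; simpa [bfsLoop] using h
  | succ f' ih =>
    intro q l x v h
    cases q with
    | nil => simpa [bfsLoop] using h
    | cons n rest =>
      cases hn : l.get? n with
      | none => simpa [bfsLoop, hn] using h
      | some m =>
        obtain ⟨fresh, _, hmem, hget, _, _, _, _⟩ := inner_spec m (ch.getD n []) l []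
        have hx : x ∉ fresh := by
          intro hxf
          have := (hmem x hxf).2
          rw [h] at this
          simp at this
        have h' : ((ch.getD n []).foldl (bfsChild m) (l, [])).1.get? x = some v := by
          rw [hget x]; simp [hx, h]
        simpa [bfsLoop, hn] using ih _ _ x v h'

-- the invariant carried through B's BFS: every label is A's answer, and every key whose
-- predecessor is start is already labelled
def InvP (d : PySem.Dict Int Int) (start : Int) (l : PySem.Dict Int Int) : Prop :=
  (∀ n m, l.get? n = some m → GoodP d start n m) ∧
  (∀ n, d.get? n = some start → (l.get? n).isSome)

theorem bfs_sound (d : PySem.Dict Int Int) (start : Int) (hnd : d.keys.Nodup) :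
    ∀ (f : Nat) (q : List Int) (l : PySem.Dict Int Int),
      InvP d start l → InvP d start (bfsLoop (childrenB d.items) f q l) := by
  intro f
  induction f with
  | zero => intro q l h; simpa [bfsLoop] using h
  | succ f' ih =>
    intro q l h
    cases q with
    | nil => simpa [bfsLoop] using h
    | cons n rest =>
      cases hn : l.get? n with
      | none => simpa [bfsLoop, hn] using h
      | some m =>
        obtain ⟨fresh, _, hmem, hget, _, _, _, _⟩ :=
          inner_spec m ((childrenB d.items).getD n []) l []
        have hinner : InvP d start (((childrenB d.items).getD n []).foldl (bfsChild m) (l, [])).1 := by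
          constructor
          · intro x v hx
            rw [hget x] at hx
            by_cases hxf : x ∈ fresh
            · rw [if_pos hxf] at hx
              obtain rfl : m = v := Option.some.inj hx
              obtain ⟨hxcs, hxnone⟩ := hmem x hxf
              have hedge : (x, n) ∈ d.items := (mem_children d.items n x).mp hxcs
              have hgx : d.get? x = some n := PySem.Dict.get?_of_mem_items d hedge hnd
              have hns : n ≠ start := by
                intro e; subst e
                have := h.2 x hgx
                rw [hxnone] at this; simp at this
              obtain ⟨fn, hfn⟩ := h.1 n m hn
              refine ⟨fn + 1, ?_⟩
              have hcond : ¬ d.get? x = some start := by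
                rw [hgx]; exact fun e => hns (Option.some.inj e)
              simp [chaseA, hgx, hfn]
              exact fun e => absurd e hns
            · rw [if_neg hxf] at hx
              exact h.1 x v hx
          · intro x hx
            rw [hget x]
            by_cases hxf : x ∈ fresh
            · simp [hxf]
            · simp only [hxf, if_false]
              exact h.2 x hx
        simpa [bfsLoop, hn] using ih _ _ hinner

-- the BFS drains its queue (the fuel is enough) and leaves the labelling closed under the
-- child relation: a labelled node's children are labelled
theorem bfs_drain (d : PySem.Dict Int Int) :
    ∀ (f : Nat) (q : List Int) (l : PySem.Dict Int Int),
      l.keys.Nodup →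
      (∀ x, l.contains x = true → x ∈ d.keys) →
      (∀ x ∈ q, (l.get? x).isSome) →
      q.length + d.size ≤ f + l.size →
      (∀ c n', d.get? c = some n' → (l.get? n').isSome = true → n' ∉ q →
        ((l.get? c).isSome : Bool)) →
      ∀ c n', d.get? c = some n' →
        ((bfsLoop (childrenB d.items) f q l).get? n').isSome = true →
        (((bfsLoop (childrenB d.items) f q l).get? c).isSome : Bool) := by
  intro f
  induction f with
  | zero =>
    intro q l hlnd hsub hq hfuel hcl c n' hedge hsome
    have hle : l.size ≤ d.size := by
      have h1 : l.keys ⊆ d.keys := fun x hx =>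
        hsub x ((PySem.Dict.contains_iff_mem_keys l x).mpr hx)
      have h2 : l.keys.length ≤ d.keys.length := by
        calc l.keys.length = l.keys.toFinset.card := (List.toFinset_card_of_nodup hlnd).symm
          _ ≤ d.keys.toFinset.card :=
            Finset.card_le_card (fun x hx => List.mem_toFinset.mpr (h1 (List.mem_toFinset.mp hx)))
          _ ≤ d.keys.length := List.toFinset_card_le d.keys
      simpa [PySem.Dict.keys, PySem.Dict.size] using h2
    have hq0 : q = [] := by
      cases q with
      | nil => rfl
      | cons a b => exfalso; simp [List.length_cons] at hfuel; omega
    subst hq0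
    simp only [bfsLoop] at hsome ⊢
    exact hcl c n' hedge hsome (by simp)
  | succ f' ih =>
    intro q l hlnd hsub hq hfuel hcl c n' hedge hsome
    cases q with
    | nil =>
      simp only [bfsLoop] at hsome ⊢
      exact hcl c n' hedge hsome (by simp)
    | cons n rest =>
      have hnsome := hq n List.mem_cons_self
      cases hn : l.get? n with
      | none => rw [hn] at hnsome; simp at hnsome
      | some m =>
        obtain ⟨fresh, hsnd, hmem, hget, hsize, hcs, hndk, hcont⟩ :=
          inner_spec m ((childrenB d.items).getD n []) l []
        set st := (((childrenB d.items).getD n []).foldl (bfsChild m) (l, [])) with hst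
        have hred : bfsLoop (childrenB d.items) (f' + 1) (n :: rest) l =
            bfsLoop (childrenB d.items) f' (rest ++ st.2) st.1 := by
          simp only [bfsLoop, hn]
          rw [hst]
        rw [hred] at hsome ⊢
        have hsnd' : st.2 = fresh := by simpa using hsnd
        rw [hsnd'] at hsome ⊢
        refine ih (rest ++ fresh) st.1 (hndk hlnd) ?_ ?_ ?_ ?_ c n' hedge hsome
        · intro x hx
          rcases hcont x hx with hx' | hx'
          · exact hsub x hx'
          · have : (x, n) ∈ d.items := (mem_children d.items n x).mp hx'
            exact PySem.Dict.mem_keys_of_mem_items d this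
        · intro x hx
          rcases List.mem_append.mp hx with hx' | hx'
          · have := hq x (List.mem_cons_of_mem _ hx')
            cases hlx : l.get? x with
            | none => rw [hlx] at this; simp at this
            | some v =>
              rw [hget x]
              by_cases hxf : x ∈ fresh
              · simp [hxf]
              · simp [hxf, hlx]
          · rw [hget x]; simp [hx']
        · rw [hsize, List.length_append]
          simp only [List.length_cons] at hfuel
          omega
        · intro c2 n2 hedge2 hsome2 hnmem2
          rw [hget n2] at hsome2
          by_cases hn2f : n2 ∈ fresh
          · exact absurd (List.mem_append.mpr (Or.inr hn2f)) hnmem2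
          · rw [if_neg hn2f] at hsome2
            by_cases hn2n : n2 = n
            · subst hn2n
              have hcs2 : c2 ∈ (childrenB d.items).getD n2 [] := by
                exact (mem_children d.items n2 c2).mpr (PySem.Dict.mem_items_of_get?_eq_some d hedge2)
              exact hcs c2 hcs2
            · have hn2q : n2 ∉ n :: rest := by
                intro hmem2
                rcases List.mem_cons.mp hmem2 with he | ho
                · exact hn2n he
                · exact hnmem2 (List.mem_append.mpr (Or.inl ho))
              have := hcl c2 n2 hedge2 hsome2 hn2q
              cases hlc : l.get? c2 with
              | none => rw [hlc] at this; simp at this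
              | some v =>
                rw [hget c2]
                by_cases hcf : c2 ∈ fresh
                · simp [hcf]
                · simp [hcf, hlc]

-- ===== VERDICT (by name: the statement is the Claim_ definition above) =====
theorem reconstruct_next_node_spec : Claim_equal_reconstruct_next_node := by
  intro prev start goal _ hpre
  unfold Spec_reconstruct_next_node reconstruct_next_node reconstruct_next_node_alt
  set d := PySem.Dict.ofList prev with hd
  obtain ⟨k, hk, hstop⟩ := hpre
  rw [← hd] at hk hstop
  have hnd : d.keys.Nodup := PySem.Dict.nodup_keys_ofList prev
  have hkeys : (d.items.map Prod.fst).Nodup := hnd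
  -- the seed state, rewritten through its closed forms
  have hfst : (seedsB d.items start).1 =
      d.items.foldl (fun l np => if np.2 = start then l.insert np.1 np.1 else l)
        PySem.Dict.empty := seeds_fst start d.items _ _
  have hsnd : (seedsB d.items start).2 =
      (d.items.filter (fun np => np.2 == start)).map Prod.fst := by
    rw [seedsB, seeds_snd start d.items _ _]; simp
  have hinit_get : ∀ x, (seedsB d.items start).1.get? x =
      if (x, start) ∈ d.items then some x else none := by
    intro x
    rw [hfst, init_get start d.items PySem.Dict.empty x hkeys]
    simp [PySem.Dict.get?_empty]
  have hseed_mem : ∀ x, x ∈ (seedsB d.items start).2 ↔ (x, start) ∈ d.items := by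
    intro x
    rw [hsnd]
    constructor
    · intro hx
      obtain ⟨np, hnp, rfl⟩ := List.mem_map.mp hx
      obtain ⟨hmem, hfilt⟩ := List.mem_filter.mp hnp
      have : np.2 = start := by simpa using hfilt
      have hnpx : np = (np.1, start) := by rw [← this]
      rwa [hnpx] at hmem
    · intro hx
      exact List.mem_map.mpr ⟨(x, start), List.mem_filter.mpr ⟨hx, by simp⟩, rfl⟩
  set L := bfsLoop (childrenB d.items) (d.size + (seedsB d.items start).2.length)
    (seedsB d.items start).2 (seedsB d.items start).1 with hL
  -- invariant at the seeds
  have hinv0 : InvP d start (seedsB d.items start).1 := by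
    constructor
    · intro x v hx
      rw [hinit_get x] at hx
      by_cases hxm : (x, start) ∈ d.items
      · obtain rfl : x = v := by simpa [hxm] using hx
        have hxs : d.get? x = some start := PySem.Dict.get?_of_mem_items d hxm hnd
        exact ⟨1, by simp [chaseA, hxs]⟩
      · simp [hxm] at hx
    · intro x hx
      rw [hinit_get x]
      have : (x, start) ∈ d.items := PySem.Dict.mem_items_of_get?_eq_some d hx
      simp [this]
  have hinv : InvP d start L :=
    bfs_sound d start hnd _ _ _ hinv0
  -- the BFS drains: the final labelling is closed under the child relation
  have hclosed : ∀ c n', d.get? c = some n' → ((L.get? n').isSome = true) →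
      ((L.get? c).isSome : Bool) := by
    refine bfs_drain d _ _ _ ?_ ?_ ?_ ?_ ?_
    · rw [hfst]
      have hform : d.items.foldl (fun l np => if np.2 = start then l.insert np.1 np.1 else l)
          PySem.Dict.empty =
          (d.items.filter (fun np => np.2 == start)).foldl
            (fun l np => l.insert np.1 np.1) PySem.Dict.empty := by
        generalize PySem.Dict.empty = l0
        induction d.items generalizing l0 with
        | nil => simp
        | cons hd tl ih =>
          by_cases h : hd.2 = start
          · simp only [List.foldl_cons, h, if_pos, List.filter_cons, beq_iff_eq]
            exact ih _
          · have h' : (hd.2 == start) = false := by simpa using h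
            simp only [List.foldl_cons, h, if_false, List.filter_cons, h']
            exact ih _
      rw [hform]
      exact PySem.Dict.nodup_keys_foldl_insert_key _ Prod.fst (fun _ np => np.1) _
        (by simp [PySem.Dict.keys_empty])
    · intro x hx
      rw [PySem.Dict.contains_eq_isSome_get?, hinit_get x] at hx
      by_cases hxm : (x, start) ∈ d.items
      · exact PySem.Dict.mem_keys_of_mem_items d hxm
      · simp [hxm] at hx
    · intro x hx
      rw [hinit_get x, if_pos ((hseed_mem x).mp hx)]
      simp
    · omega
    · intro c n' hedge hsome hnmem
      exfalso
      rw [hinit_get n'] at hsome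
      by_cases hm : (n', start) ∈ d.items
      · exact hnmem ((hseed_mem n').mpr hm)
      · simp [hm] at hsome
  -- completeness: whatever A's walk returns is in the final labelling
  have hcomplete : ∀ (j : Nat) (n m : Int), chaseA d start (j + 1) n = some m →
      L.get? n = some m := by
    intro j
    induction j with
    | zero =>
      intro n m h
      have hs : d.get? n = some start ∧ m = n := by
        by_cases hc : d.get? n = some start
        · refine ⟨hc, ?_⟩
          simpa [chaseA, hc] using h.symm
        · exfalso
          cases hg : d.get? n with
          | none => simp [chaseA, hg] at h
          | some p =>
            simp [chaseA, hg] at h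
            exact hc (by rw [hg, h.1])
      obtain ⟨hc, rfl⟩ := hs
      have : (seedsB d.items start).1.get? m = some m := by
        rw [hinit_get m, if_pos (PySem.Dict.mem_items_of_get?_eq_some d hc)]
      exact bfs_get_some _ _ _ _ m m this
    | succ j ih =>
      intro n m h
      by_cases hc : d.get? n = some start
      · have hmn : m = n := by simpa [chaseA, hc] using h.symm
        subst hmn
        have : (seedsB d.items start).1.get? m = some m := by
          rw [hinit_get m, if_pos (PySem.Dict.mem_items_of_get?_eq_some d hc)]
        exact bfs_get_some _ _ _ _ m m this
      · cases hg : d.get? n with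
        | none => simp [chaseA, hg] at h
        | some p =>
          have hps : ¬ p = start := fun e => hc (by rw [hg, e])
          have h' : chaseA d start (j + 1) p = some m := by
            simpa [chaseA, hg, hps] using h
          have hLp : L.get? p = some m := ih p m h'
          have hsomep : (L.get? p).isSome = true := by rw [hLp]; simp
          have hsn := hclosed n p hg hsomep
          cases hLn : L.get? n with
          | none => rw [hLn] at hsn; simp at hsn
          | some m' =>
            have hgood' : GoodP d start n m' := hinv.1 n m' hLn
            have hgood : GoodP d start n m := ⟨j + 2, h⟩
            rw [good_unique d start n m' m hgood' hgood]
  by_cases hgm : (d.get? goal).isSome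
  · simp only [hgm, if_pos]
    cases hA : chaseA d start (d.size + 1) goal with
    | some m => exact (hcomplete d.size goal m hA).symm
    | none =>
      cases hB : L.get? goal with
      | none => rfl
      | some m =>
        exfalso
        obtain ⟨f, hf⟩ := hinv.1 goal m hB
        have hfix := chase_stable d start k goal hstop
        have h1 : chaseA d start (k + 1 + f) goal = chaseA d start (k + 1) goal := hfix f
        have h2 : chaseA d start (f + (k + 1)) goal = some m := chase_mono d start f (k + 1) goal m hf
        rw [Nat.add_comm f (k + 1)] at h2
        have h3 : chaseA d start (k + 1) goal = some m := by rw [← h1, h2]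
        have h4 : chaseA d start (k + 1 + (d.size - k)) goal = some m := by
          rw [hfix (d.size - k), h3]
        have hke : k + 1 + (d.size - k) = d.size + 1 := by omega
        rw [hke, hA] at h4
        simp at h4
  · simp only [hgm, if_neg, Bool.false_eq_true, not_false_iff]
    cases hB : L.get? goal with
    | none => rfl
    | some m =>
      exfalso
      obtain ⟨f, hf⟩ := hinv.1 goal m hB
      cases f with
      | zero => simp [chaseA] at hf
      | succ f' =>
        have hgn : d.get? goal = none := by
          cases h : d.get? goal with
          | none => rfl
          | some _ => rw [h] at hgm; simp at hgm
        simp [chaseA, hgn] at hf
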